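-- pv_equiv track=rewrite | github.com/broschart/spectralq-core | plugins/watchzone/aircraft/_transport.py | _reg_to_country
-- ===== SOURCE A (Python) =====
-- def _reg_to_country(reg):
--     """Ermittelt das Registrierungsland aus dem Kennzeichen-Präfix."""
--     if not reg:
--         return ""
--     r = reg.upper()
--     _PREFIXES = [
--         ("D-",    "Germany"),
--         ("OE-",   "Austria"),
--         ("HB-",   "Switzerland"),
--         ("N",     "USA"),
--         ("G-",    "United Kingdom"),
--         ("F-",    "France"),
--         ("I-",    "Italy"),
--         ("EC-",   "Spain"),
--         ("PH-",   "Netherlands"),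
--         ("OO-",   "Belgium"),
--         ("SE-",   "Sweden"),
--         ("OH-",   "Finland"),
--         ("OY-",   "Denmark"),
--         ("LN-",   "Norway"),
--         ("EI-",   "Ireland"),
--         ("CS-",   "Portugal"),
--         ("SX-",   "Greece"),
--         ("TC-",   "Turkey"),
--         ("RA-",   "Russia"),
--         ("SP-",   "Poland"),
--         ("OK-",   "Czech Republic"),
--         ("HA-",   "Hungary"),
--         ("OM-",   "Slovakia"),
--         ("YR-",   "Romania"),
--         ("LZ-",   "Bulgaria"),
--         ("9A-",   "Croatia"),
--         ("S5-",   "Slovenia"),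
--         ("ES-",   "Estonia"),
--         ("YL-",   "Latvia"),
--         ("LY-",   "Lithuania"),
--         ("9H-",   "Malta"),
--         ("4X-",   "Israel"),
--         ("A6-",   "UAE"),
--         ("A7-",   "Qatar"),
--         ("HZ-",   "Saudi Arabia"),
--         ("EP-",   "Iran"),
--         ("AP-",   "Pakistan"),
--         ("VT-",   "India"),
--         ("JA-",   "Japan"),
--         ("HL-",   "South Korea"),
--         ("B-",    "China/Taiwan"),
--         ("9V-",   "Singapore"),
--         ("9M-",   "Malaysia"),
--         ("HS-",   "Thailand"),
--         ("PK-",   "Indonesia"),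
--         ("VH-",   "Australia"),
--         ("ZK-",   "New Zealand"),
--         ("C-",    "Canada"),
--         ("XA-",   "Mexico"),
--         ("PT-",   "Brazil"),
--         ("PP-",   "Brazil"),
--         ("PR-",   "Brazil"),
--         ("LV-",   "Argentina"),
--         ("CC-",   "Chile"),
--         ("ZS-",   "South Africa"),
--         ("SU-",   "Egypt"),
--         ("CN-",   "Morocco"),
--         ("ET-",   "Ethiopia"),
--         ("5N-",   "Nigeria"),
--     ]
--     for prefix, country in _PREFIXES:
--         if r.startswith(prefix):
--             return country
--     return ""
-- ===== SOURCE B (Python) =====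
-- # Table kept as compact "prefix:country" records, parsed once into a dict at
-- # import time; lookup probes the three possible prefix lengths against the dict.
-- _RECORDS = [
--     "D-:Germany", "OE-:Austria", "HB-:Switzerland", "N:USA", "G-:United Kingdom",
--     "F-:France", "I-:Italy", "EC-:Spain", "PH-:Netherlands", "OO-:Belgium",
--     "SE-:Sweden", "OH-:Finland", "OY-:Denmark", "LN-:Norway", "EI-:Ireland",
--     "CS-:Portugal", "SX-:Greece", "TC-:Turkey", "RA-:Russia", "SP-:Poland",
--     "OK-:Czech Republic", "HA-:Hungary", "OM-:Slovakia", "YR-:Romania", "LZ-:Bulgaria",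
--     "9A-:Croatia", "S5-:Slovenia", "ES-:Estonia", "YL-:Latvia", "LY-:Lithuania",
--     "9H-:Malta", "4X-:Israel", "A6-:UAE", "A7-:Qatar", "HZ-:Saudi Arabia",
--     "EP-:Iran", "AP-:Pakistan", "VT-:India", "JA-:Japan", "HL-:South Korea",
--     "B-:China/Taiwan", "9V-:Singapore", "9M-:Malaysia", "HS-:Thailand", "PK-:Indonesia",
--     "VH-:Australia", "ZK-:New Zealand", "C-:Canada", "XA-:Mexico", "PT-:Brazil",
--     "PP-:Brazil", "PR-:Brazil", "LV-:Argentina", "CC-:Chile", "ZS-:South Africa",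
--     "SU-:Egypt", "CN-:Morocco", "ET-:Ethiopia", "5N-:Nigeria",
-- ]
--
-- _COUNTRY_BY_PREFIX = dict(rec.split(":") for rec in _RECORDS)
--
--
-- def _reg_to_country(reg):
--     """Ermittelt das Registrierungsland aus dem Kennzeichen-Präfix."""
--     if not reg:
--         return ""
--     r = reg.upper()
--     # No registered prefix is a prefix of another, so probing the three
--     # possible prefix lengths against the dict finds the unique match.
--     for k in (1, 2, 3):
--         country = _COUNTRY_BY_PREFIX.get(r[:k])
--         if country is not None:
--             return country
--     return ""
-- ===== Notes on version B (the rewrite author's own statement) =====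
-- stated objective: idiomatic
-- what changed: Replaces the linear startswith scan over 60 (prefix, country) pairs with a dict parsed once from compact 'prefix:country' records and at most three lookups of r[:k] for k in (1,2,3), the only prefix lengths present; since no prefix is a prefix of another this is behaviour-identical.
import Mathlib
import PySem

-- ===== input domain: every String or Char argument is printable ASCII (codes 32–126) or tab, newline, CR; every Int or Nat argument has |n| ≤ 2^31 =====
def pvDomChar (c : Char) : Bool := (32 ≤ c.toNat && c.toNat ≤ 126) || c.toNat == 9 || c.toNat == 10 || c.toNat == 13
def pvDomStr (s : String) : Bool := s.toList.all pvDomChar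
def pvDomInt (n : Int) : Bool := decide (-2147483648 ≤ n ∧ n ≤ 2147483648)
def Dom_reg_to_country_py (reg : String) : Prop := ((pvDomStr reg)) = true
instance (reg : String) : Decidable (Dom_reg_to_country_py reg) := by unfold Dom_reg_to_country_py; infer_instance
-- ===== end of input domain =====

-- B replaces A's linear scan over 60 (prefix, country) pairs by a dict parsed once from
-- compact "prefix:country" records and at most three lookups of r[:k], k = 1,2,3.

-- ===== PORT A =====
-- A's local _PREFIXES list, in A's order.
def pvPrefixesA : List (String × String) :=
  [("D-", "Germany"), ("OE-", "Austria"), ("HB-", "Switzerland"), ("N", "USA"),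
   ("G-", "United Kingdom"), ("F-", "France"), ("I-", "Italy"), ("EC-", "Spain"),
   ("PH-", "Netherlands"), ("OO-", "Belgium"), ("SE-", "Sweden"), ("OH-", "Finland"),
   ("OY-", "Denmark"), ("LN-", "Norway"), ("EI-", "Ireland"), ("CS-", "Portugal"),
   ("SX-", "Greece"), ("TC-", "Turkey"), ("RA-", "Russia"), ("SP-", "Poland"),
   ("OK-", "Czech Republic"), ("HA-", "Hungary"), ("OM-", "Slovakia"), ("YR-", "Romania"),
   ("LZ-", "Bulgaria"), ("9A-", "Croatia"), ("S5-", "Slovenia"), ("ES-", "Estonia"),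
   ("YL-", "Latvia"), ("LY-", "Lithuania"), ("9H-", "Malta"), ("4X-", "Israel"),
   ("A6-", "UAE"), ("A7-", "Qatar"), ("HZ-", "Saudi Arabia"), ("EP-", "Iran"),
   ("AP-", "Pakistan"), ("VT-", "India"), ("JA-", "Japan"), ("HL-", "South Korea"),
   ("B-", "China/Taiwan"), ("9V-", "Singapore"), ("9M-", "Malaysia"), ("HS-", "Thailand"),
   ("PK-", "Indonesia"), ("VH-", "Australia"), ("ZK-", "New Zealand"), ("C-", "Canada"),
   ("XA-", "Mexico"), ("PT-", "Brazil"), ("PP-", "Brazil"), ("PR-", "Brazil"),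
   ("LV-", "Argentina"), ("CC-", "Chile"), ("ZS-", "South Africa"), ("SU-", "Egypt"),
   ("CN-", "Morocco"), ("ET-", "Ethiopia"), ("5N-", "Nigeria")]

-- 'for prefix, country in _PREFIXES: if r.startswith(prefix): return country' = first hit of the scan.
def reg_to_country_py (reg : String) : String :=
  if reg = "" then ""
  else
    let r := PySem.Str.upper reg
    match pvPrefixesA.find? (fun pc => PySem.Str.startswith r pc.1) with
    | some pc => pc.2
    | none => ""

-- ===== PORT B =====
-- B's module-level record list _RECORDS ('prefix:country' strings).
def pvRecordsB : List String :=
  ["D-:Germany", "OE-:Austria", "HB-:Switzerland", "N:USA", "G-:United Kingdom",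
   "F-:France", "I-:Italy", "EC-:Spain", "PH-:Netherlands", "OO-:Belgium", "SE-:Sweden",
   "OH-:Finland", "OY-:Denmark", "LN-:Norway", "EI-:Ireland", "CS-:Portugal", "SX-:Greece",
   "TC-:Turkey", "RA-:Russia", "SP-:Poland", "OK-:Czech Republic", "HA-:Hungary",
   "OM-:Slovakia", "YR-:Romania", "LZ-:Bulgaria", "9A-:Croatia", "S5-:Slovenia",
   "ES-:Estonia", "YL-:Latvia", "LY-:Lithuania", "9H-:Malta", "4X-:Israel", "A6-:UAE",
   "A7-:Qatar", "HZ-:Saudi Arabia", "EP-:Iran", "AP-:Pakistan", "VT-:India", "JA-:Japan",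
   "HL-:South Korea", "B-:China/Taiwan", "9V-:Singapore", "9M-:Malaysia", "HS-:Thailand",
   "PK-:Indonesia", "VH-:Australia", "ZK-:New Zealand", "C-:Canada", "XA-:Mexico",
   "PT-:Brazil", "PP-:Brazil", "PR-:Brazil", "LV-:Argentina", "CC-:Chile", "ZS-:South Africa",
   "SU-:Egypt", "CN-:Morocco", "ET-:Ethiopia", "5N-:Nigeria"]

-- '_COUNTRY_BY_PREFIX = dict(rec.split(":") for rec in _RECORDS)'
-- (every record is 'prefix:country' with exactly one ':', so rec.split(":") always
-- yields a pair; the catch-all arm of the match is unreachable on this literal table).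
def pvTableB : PySem.Dict String String :=
  PySem.Dict.ofList
    (pvRecordsB.map (fun rec =>
      match (PySem.Str.split? rec ":").getD [] with
      | [k, v] => (k, v)
      | _ => (rec, "")))

-- 'for k in (1, 2, 3): country = _COUNTRY_BY_PREFIX.get(r[:k]); if country is not None: return country'
def reg_to_country_py_alt (reg : String) : String :=
  if reg = "" then ""
  else
    let r := PySem.Str.upper reg
    match [(1 : Int), 2, 3].findSome? (fun k => (pvTableB).get? (PySem.Str.slice r none (some k))) with
    | some country => country
    | none => ""

-- ===== PRECONDITION & SPEC =====
def Spec_reg_to_country_py (reg : String) (out : String) : Prop := out = reg_to_country_py_alt reg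
instance (reg : String) (out : String) : Decidable (Spec_reg_to_country_py reg out) := by unfold Spec_reg_to_country_py; infer_instance

-- ===== CLAIM (what is proved, stated in full; the proofs are below) =====
def Claim_equal_reg_to_country_py : Prop := ∀ (reg : String), Dom_reg_to_country_py reg → Spec_reg_to_country_py reg (reg_to_country_py reg)

-- ===== LEMMAS AND PROOFS =====

-- evaluate the string-table parse once: B's dict is the dict of A's pair list
set_option maxHeartbeats 4000000 in
set_option maxRecDepth 100000 in
theorem pvParsedEq : pvTableB = PySem.Dict.ofList pvPrefixesA := by rfl

set_option maxRecDepth 10000 in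
theorem pvItems : pvTableB.items = pvPrefixesA := by rw [pvParsedEq]; decide

set_option maxRecDepth 10000 in
theorem pvNoPreBool : (pvPrefixesA.all (fun e => pvPrefixesA.all (fun e' =>
    !(e.1.toList.isPrefixOf e'.1.toList) || (e == e')))) = true := by decide

theorem pvNoPre : ∀ e ∈ pvPrefixesA, ∀ e' ∈ pvPrefixesA, e.1.toList <+: e'.1.toList → e = e' := by
  intro e he e' he' hp
  have h1 := List.all_eq_true.mp (List.all_eq_true.mp pvNoPreBool e he) e' he'
  rw [Bool.or_eq_true, Bool.not_eq_true', ← Bool.not_eq_true] at h1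
  rcases h1 with h1 | h1
  · exact absurd (List.isPrefixOf_iff_prefix.mpr hp) h1
  · exact eq_of_beq h1

set_option maxRecDepth 10000 in
theorem pvLens : ∀ e ∈ pvPrefixesA, e.1.toList.length = 1 ∨ e.1.toList.length = 2 ∨ e.1.toList.length = 3 := by decide

set_option maxRecDepth 10000 in
theorem pvLookupBool : (pvPrefixesA.all (fun e => pvTableB.get? e.1 == some e.2)) = true := by
  rw [pvParsedEq]; decide

theorem pvLookup : ∀ e ∈ pvPrefixesA, pvTableB.get? e.1 = some e.2 := by
  intro e he
  exact eq_of_beq (List.all_eq_true.mp pvLookupBool e he)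

theorem pvGetSome {s c : String} (h : pvTableB.get? s = some c) : (s, c) ∈ pvPrefixesA := by
  have := PySem.Dict.mem_items_of_get?_eq_some _ h
  rwa [pvItems] at this

theorem pvSliceTake (r : String) (k : Int) (hk : 0 ≤ k) :
    (PySem.Str.slice r none (some k)).toList = r.toList.take k.toNat := by
  simp [PySem.Str.toList_slice, PySem.Chars.slice_eq_listSlice, PySem.List.slice_to _ hk]

theorem pvProbe_some (r : String) (k : Int) (hk : 0 ≤ k) (e : String × String)
    (he : e ∈ pvPrefixesA) (h : r.toList.take k.toNat = e.1.toList) :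
    pvTableB.get? (PySem.Str.slice r none (some k)) = some e.2 := by
  have hs : PySem.Str.slice r none (some k) = e.1 :=
    String.toList_inj.mp (by rw [pvSliceTake r k hk, h])
  rw [hs]; exact pvLookup e he

theorem pvProbe_none (r : String) (k : Int) (hk : 0 ≤ k)
    (h : ∀ e ∈ pvPrefixesA, e.1.toList ≠ r.toList.take k.toNat) :
    pvTableB.get? (PySem.Str.slice r none (some k)) = none := by
  cases hg : pvTableB.get? (PySem.Str.slice r none (some k)) with
  | none => rfl
  | some c =>
    exact absurd (by rw [pvSliceTake r k hk]) (h _ (pvGetSome hg))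

theorem pvProbe_none_lt (r : String) (e : String × String) (he : e ∈ pvPrefixesA)
    (hp : e.1.toList <+: r.toList)
    (huniq : ∀ e' ∈ pvPrefixesA, e'.1.toList <+: r.toList → e' = e)
    (k : Int) (hk : 0 ≤ k) (hlt : k.toNat < e.1.toList.length) :
    pvTableB.get? (PySem.Str.slice r none (some k)) = none := by
  apply pvProbe_none r k hk
  intro e' he' heq
  have hpre : e'.1.toList <+: r.toList := heq ▸ List.take_prefix _ _
  have hee : e' = e := huniq e' he' hpre
  subst hee
  have hk0 : e'.1.toList.length ≤ r.toList.length := hp.length_le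
  have : e'.1.toList.length = min k.toNat r.toList.length := by rw [heq, List.length_take]
  omega

theorem pvCore (r : String) :
    (match pvPrefixesA.find? (fun pc => PySem.Str.startswith r pc.1) with
      | some pc => pc.2 | none => "")
    = (match [(1 : Int), 2, 3].findSome? (fun k => pvTableB.get? (PySem.Str.slice r none (some k))) with
      | some country => country | none => "") := by
  have hpred : ∀ pc ∈ pvPrefixesA,
      PySem.Str.startswith r pc.1 = pc.1.toList.isPrefixOf r.toList := by
    intro pc _
    rw [Bool.eq_iff_iff, List.isPrefixOf_iff_prefix]
    simp [PySem.Chars.startswith_iff]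
  have hA : pvPrefixesA.find? (fun pc => PySem.Str.startswith r pc.1)
      = (pvPrefixesA.filter (fun pc => pc.1.toList.isPrefixOf r.toList)).head? := by
    rw [← List.head?_filter, List.filter_congr hpred]
  cases hfl : pvPrefixesA.filter (fun pc => pc.1.toList.isPrefixOf r.toList) with
  | nil =>
    have hnone : ∀ e ∈ pvPrefixesA, ¬ e.1.toList <+: r.toList := by
      intro e he hp
      have : e ∈ pvPrefixesA.filter (fun pc => pc.1.toList.isPrefixOf r.toList) :=
        List.mem_filter.mpr ⟨he, List.isPrefixOf_iff_prefix.mpr hp⟩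
      rw [hfl] at this; exact absurd this (List.not_mem_nil)
    have hk : ∀ k : Int, 0 ≤ k →
        pvTableB.get? (PySem.Str.slice r none (some k)) = none := by
      intro k hk0
      apply pvProbe_none r k hk0
      intro e he heq
      exact hnone e he (heq ▸ List.take_prefix _ _)
    rw [hA, hfl]
    simp [List.findSome?, hk 1 (by omega), hk 2 (by omega), hk 3 (by omega)]
  | cons e t =>
    have hmem : e ∈ pvPrefixesA.filter (fun pc => pc.1.toList.isPrefixOf r.toList) := by
      rw [hfl]; exact List.mem_cons_self
    have he : e ∈ pvPrefixesA := (List.mem_filter.mp hmem).1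
    have hp : e.1.toList <+: r.toList :=
      List.isPrefixOf_iff_prefix.mp (List.mem_filter.mp hmem).2
    have huniq : ∀ e' ∈ pvPrefixesA, e'.1.toList <+: r.toList → e' = e := by
      intro e' he' hp'
      rcases List.prefix_or_prefix_of_prefix hp' hp with h | h
      · exact pvNoPre e' he' e he h
      · exact (pvNoPre e he e' he' h).symm
    have htake : r.toList.take e.1.toList.length = e.1.toList :=
      (List.prefix_iff_eq_take.mp hp).symm
    rw [hA, hfl]
    rcases pvLens e he with hl | hl | hl
    · have h1 : pvTableB.get? (PySem.Str.slice r none (some 1)) = some e.2 :=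
        pvProbe_some r 1 (by omega) e he (by rw [show (1:Int).toNat = 1 from rfl, ← hl, htake])
      simp [List.findSome?, h1]
    · have h1 : pvTableB.get? (PySem.Str.slice r none (some 1)) = none :=
        pvProbe_none_lt r e he hp huniq 1 (by omega) (by omega)
      have h2 : pvTableB.get? (PySem.Str.slice r none (some 2)) = some e.2 :=
        pvProbe_some r 2 (by omega) e he (by rw [show (2:Int).toNat = 2 from rfl, ← hl, htake])
      simp [List.findSome?, h1, h2]
    · have h1 : pvTableB.get? (PySem.Str.slice r none (some 1)) = none :=
        pvProbe_none_lt r e he hp huniq 1 (by omega) (by omega)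
      have h2 : pvTableB.get? (PySem.Str.slice r none (some 2)) = none :=
        pvProbe_none_lt r e he hp huniq 2 (by omega) (by omega)
      have h3 : pvTableB.get? (PySem.Str.slice r none (some 3)) = some e.2 :=
        pvProbe_some r 3 (by omega) e he (by rw [show (3:Int).toNat = 3 from rfl, ← hl, htake])
      simp [List.findSome?, h1, h2, h3]

-- ===== VERDICT (by name: the statement is the Claim_ definition above) =====
set_option maxRecDepth 10000 in
theorem reg_to_country_py_spec : Claim_equal_reg_to_country_py := by
  intro reg _
  unfold Spec_reg_to_country_py reg_to_country_py reg_to_country_py_alt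
  by_cases h : reg = ""
  · rw [if_pos h, if_pos h]
  · rw [if_neg h, if_neg h]
    exact pvCore (PySem.Str.upper reg)
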